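-- pv_equiv track=rewrite | github.com/beskacz/egx-cnc | egxview/egxview.py | max_xy
-- ===== SOURCE A (Python) =====
-- def max_xy(tokens):
--   mx = -9999999
--   my = -9999999
--   for t in tokens:
--     if t[:2] in ['PU', 'PD']:
--       if len(t) > 2:
--         xy = t[2:].split(',')
--         xy = (int(xy[0]), int(xy[1]))
--         if xy[0] > mx:
--           mx = xy[0]
--         if xy[1] > my:
--           my = xy[1]
--   return (mx, my)
-- ===== SOURCE B (Python) =====
-- def max_xy(tokens):
--   pts = [t[2:].split(',') for t in tokens if t[:2] in ('PU', 'PD') and len(t) > 2]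
--   xs = [-9999999] + [int(p[0]) for p in pts]
--   ys = [-9999999] + [int(p[1]) for p in pts]
--   return (sorted(xs, reverse=True)[0], sorted(ys, reverse=True)[0])
-- ===== Notes on version B (the rewrite author's own statement) =====
-- stated objective: alternative
-- what changed: replaces A's single-pass running-maximum loop with staged passes that collect the parsed PU/PD coordinates (with the -9999999 floor included) and then obtain each maximum by a descending sort and taking the first element
import Mathlib
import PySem

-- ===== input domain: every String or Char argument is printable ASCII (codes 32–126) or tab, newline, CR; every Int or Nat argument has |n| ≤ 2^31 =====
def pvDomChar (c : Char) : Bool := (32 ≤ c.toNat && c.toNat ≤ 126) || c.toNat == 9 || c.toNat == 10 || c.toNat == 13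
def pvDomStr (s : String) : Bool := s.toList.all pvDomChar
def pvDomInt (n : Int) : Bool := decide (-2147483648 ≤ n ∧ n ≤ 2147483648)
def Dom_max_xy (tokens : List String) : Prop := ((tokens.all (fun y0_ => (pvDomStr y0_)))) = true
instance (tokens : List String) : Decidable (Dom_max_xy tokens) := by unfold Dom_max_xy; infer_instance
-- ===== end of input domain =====

-- B replaces A's running-maximum loop with staged collection passes and a descending sort whose head is the maximum (objective: alternative).

-- ===== PORT A =====
-- literal transliteration: one fold over the tokens carrying the running maxima (mx, my)
def max_xy (tokens : List String) : Int × Int :=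
  tokens.foldl (fun mxy t =>
    if ["PU", "PD"].contains (PySem.Str.slice t none (some 2)) then
      if 2 < PySem.Str.len t then
        let xy := (PySem.Str.split? (PySem.Str.slice t (some 2) none) ",").getD []
        let x := (PySem.Int.ofStr? ((PySem.List.pyGet? xy 0).getD "")).getD 0
        let y := (PySem.Int.ofStr? ((PySem.List.pyGet? xy 1).getD "")).getD 0
        let mx := if x > mxy.1 then x else mxy.1
        let my := if y > mxy.2 then y else mxy.2
        (mx, my)
      else mxy
    else mxy)
    (-9999999, -9999999)

-- ===== PORT B =====
-- B-side helpers (the comprehension's filter and per-token split)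
def pvKeep (t : String) : Bool :=
  ["PU", "PD"].contains (PySem.Str.slice t none (some 2)) && decide (2 < PySem.Str.len t)

def pvParts (t : String) : List String :=
  (PySem.Str.split? (PySem.Str.slice t (some 2) none) ",").getD []

-- int(p[i]); out-of-range/unparsable defaults are excluded by Pre_
def pvCoord (p : List String) (i : Int) : Int :=
  (PySem.Int.ofStr? ((PySem.List.pyGet? p i).getD "")).getD 0

def max_xy_alt (tokens : List String) : Int × Int :=
  let pts := (tokens.filter pvKeep).map pvParts
  let xs := (-9999999) :: pts.map (fun p => pvCoord p 0)
  let ys := (-9999999) :: pts.map (fun p => pvCoord p 1)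
  ((PySem.List.pyGet? (PySem.List.sorted xs (fun v => v) true) 0).getD 0,
   (PySem.List.pyGet? (PySem.List.sorted ys (fun v => v) true) 0).getD 0)

-- ===== PRECONDITION & SPEC =====
-- Pre_ excludes exactly the tokens on which the Python raises: a PU/PD token of length > 2
-- whose tail does not split on ',' into at least two pieces, or whose first two pieces int() rejects.
def pvTokOk (t : String) : Bool :=
  !(["PU", "PD"].contains (PySem.Str.slice t none (some 2)) && decide (2 < PySem.Str.len t)) ||
    (let ps := (PySem.Str.split? (PySem.Str.slice t (some 2) none) ",").getD []
     decide (2 ≤ ps.length) && (PySem.Int.ofStr? (ps.getD 0 "")).isSome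
       && (PySem.Int.ofStr? (ps.getD 1 "")).isSome)

def Pre_max_xy (tokens : List String) : Prop := tokens.all pvTokOk = true
instance (tokens : List String) : Decidable (Pre_max_xy tokens) := by unfold Pre_max_xy; infer_instance

def pvWitness_max_xy : List String := ["PU10,20", "IN;", "PD-3,40", "PU", "SP1"]

def Spec_max_xy (tokens : List String) (out : Int × Int) : Prop := out = max_xy_alt tokens
instance (tokens : List String) (out : Int × Int) : Decidable (Spec_max_xy tokens out) := by unfold Spec_max_xy; infer_instance

-- ===== CLAIM (what is proved, stated in full; the proofs are below) =====
def Claim_equal_max_xy : Prop := ∀ (tokens : List String), Dom_max_xy tokens → Pre_max_xy tokens → Spec_max_xy tokens (max_xy tokens)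

-- ===== LEMMAS AND PROOFS =====

theorem pv_ite_max (a b : Int) : (if b > a then b else a) = max a b := by
  rw [max_def]; split_ifs <;> omega

-- A's loop computes the running maxima of the projected coordinate lists
theorem pv_loop (tokens : List String) (m1 m2 : Int) :
    tokens.foldl (fun mxy t =>
      if ["PU", "PD"].contains (PySem.Str.slice t none (some 2)) then
        if 2 < PySem.Str.len t then
          ((if (PySem.Int.ofStr? ((PySem.List.pyGet? ((PySem.Str.split? (PySem.Str.slice t (some 2) none) ",").getD []) 0).getD "")).getD 0 > mxy.1
              then (PySem.Int.ofStr? ((PySem.List.pyGet? ((PySem.Str.split? (PySem.Str.slice t (some 2) none) ",").getD []) 0).getD "")).getD 0 else mxy.1),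
           (if (PySem.Int.ofStr? ((PySem.List.pyGet? ((PySem.Str.split? (PySem.Str.slice t (some 2) none) ",").getD []) 1).getD "")).getD 0 > mxy.2
              then (PySem.Int.ofStr? ((PySem.List.pyGet? ((PySem.Str.split? (PySem.Str.slice t (some 2) none) ",").getD []) 1).getD "")).getD 0 else mxy.2))
        else mxy
      else mxy) (m1, m2)
    = ((((tokens.filter pvKeep).map pvParts).map (fun p => pvCoord p 0)).foldl max m1,
       (((tokens.filter pvKeep).map pvParts).map (fun p => pvCoord p 1)).foldl max m2) := by
  induction tokens generalizing m1 m2 with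
  | nil => rfl
  | cons t ts ih =>
      by_cases h1 : ["PU", "PD"].contains (PySem.Str.slice t none (some 2)) = true
      · by_cases h2 : 2 < PySem.Str.len t
        · have hk : pvKeep t = true := by
            unfold pvKeep
            rw [h1, decide_eq_true h2]
            rfl
          rw [List.foldl_cons, if_pos h1, if_pos h2, List.filter_cons_of_pos hk,
            List.map_cons, List.map_cons, List.map_cons, pv_ite_max, pv_ite_max, ih]
          simp only [List.foldl_cons, pvCoord, pvParts]
        · have hk : ¬ pvKeep t = true := by
            unfold pvKeep
            rw [h1, decide_eq_false h2]
            simp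
          rw [List.foldl_cons, if_pos h1, if_neg h2, List.filter_cons_of_neg hk]
          exact ih m1 m2
      · have hk : ¬ pvKeep t = true := by
          unfold pvKeep
          rw [Bool.eq_false_iff.mpr h1]
          simp
        rw [List.foldl_cons, if_neg h1, List.filter_cons_of_neg hk]
        exact ih m1 m2

-- the head of a descending sort of (s :: xs) is the running maximum foldl max s xs
theorem pv_sort_head (s : Int) (xs : List Int) :
    (PySem.List.pyGet? (PySem.List.sorted (s :: xs) (fun v => v) true) 0).getD 0
      = xs.foldl max s := by
  obtain ⟨m, t, hmt⟩ : ∃ m t, PySem.List.sorted (s :: xs) (fun v => v) true = m :: t := by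
    cases h : PySem.List.sorted (s :: xs) (fun v => v) true with
    | nil => exact absurd ((PySem.List.sorted_eq_nil_iff _ _ _).mp h) (by simp)
    | cons m t => exact ⟨m, t, rfl⟩
  have hge : ∀ y ∈ s :: xs, y ≤ m := by
    intro y hy
    exact PySem.List.key_head_sorted_rev_ge _ _ hmt y hy
  have hmem : m ∈ s :: xs := by
    rw [← PySem.List.mem_sorted (rev := true) (key := fun v => v), hmt]
    exact List.mem_cons_self
  have hM := PySem.List.le_foldl_max xs s
  have hMmem : xs.foldl max s ∈ s :: xs := by
    rcases PySem.List.foldl_max_mem xs s with h | h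
    · rw [h]; exact List.mem_cons_self
    · exact List.mem_cons_of_mem _ h
  have h1 : m ≤ xs.foldl max s := by
    rcases List.mem_cons.mp hmem with h | h
    · rw [h]; exact hM.1
    · exact hM.2 m h
  have h2 : xs.foldl max s ≤ m := hge _ hMmem
  rw [hmt]
  simp [PySem.List.pyGet?, PySem.List.pyIdx?]
  omega

-- ===== VERDICT (by name: the statement is the Claim_ definition above) =====
theorem max_xy_spec : Claim_equal_max_xy := by
  intro tokens _ _
  show max_xy tokens = max_xy_alt tokens
  unfold max_xy max_xy_alt
  rw [show (fun (mxy : Int × Int) (t : String) =>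
      if ["PU", "PD"].contains (PySem.Str.slice t none (some 2)) then
        if 2 < PySem.Str.len t then
          let xy := (PySem.Str.split? (PySem.Str.slice t (some 2) none) ",").getD [];
          let x := (PySem.Int.ofStr? ((PySem.List.pyGet? xy 0).getD "")).getD 0;
          let y := (PySem.Int.ofStr? ((PySem.List.pyGet? xy 1).getD "")).getD 0;
          let mx := if x > mxy.1 then x else mxy.1;
          let my := if y > mxy.2 then y else mxy.2;
          (mx, my)
        else mxy
      else mxy) = (fun mxy t =>
      if ["PU", "PD"].contains (PySem.Str.slice t none (some 2)) then
        if 2 < PySem.Str.len t then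
          ((if (PySem.Int.ofStr? ((PySem.List.pyGet? ((PySem.Str.split? (PySem.Str.slice t (some 2) none) ",").getD []) 0).getD "")).getD 0 > mxy.1
              then (PySem.Int.ofStr? ((PySem.List.pyGet? ((PySem.Str.split? (PySem.Str.slice t (some 2) none) ",").getD []) 0).getD "")).getD 0 else mxy.1),
           (if (PySem.Int.ofStr? ((PySem.List.pyGet? ((PySem.Str.split? (PySem.Str.slice t (some 2) none) ",").getD []) 1).getD "")).getD 0 > mxy.2
              then (PySem.Int.ofStr? ((PySem.List.pyGet? ((PySem.Str.split? (PySem.Str.slice t (some 2) none) ",").getD []) 1).getD "")).getD 0 else mxy.2))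
        else mxy
      else mxy) from rfl]
  rw [pv_loop]
  show _ = ((PySem.List.pyGet? (PySem.List.sorted ((-9999999) :: ((tokens.filter pvKeep).map pvParts).map (fun p => pvCoord p 0)) (fun v => v) true) 0).getD 0,
    (PySem.List.pyGet? (PySem.List.sorted ((-9999999) :: ((tokens.filter pvKeep).map pvParts).map (fun p => pvCoord p 1)) (fun v => v) true) 0).getD 0)
  rw [pv_sort_head, pv_sort_head]
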